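-- pv_equiv track=rewrite | github.com/DancingOnAir/LeetcodePythonSolution | DPDigit/0600_non-negative_integers_without_consecutive_ones.py | findIntegers1
-- ===== SOURCE A (Python) =====
-- from functools import lru_cache
--
-- def findIntegers1(num: int) -> int:
--     N = list(map(int, bin(num)[2:]))
--
--     @lru_cache(None)
--     def dp(idx, prefix, bigger, last_one):
--         if idx == len(N):
--             return 1 if not bigger else 0
--
--         res = 0
--         for bit in [0] + ([] if last_one else [1]):
--             _prefix = prefix and bit == N[idx]
--             _bigger = bigger or (prefix and bit and not N[idx])
--             res += dp(idx + 1, _prefix, _bigger, bit == 1)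
--
--         return res
--
--     return dp(0, True, False, 0)
-- ===== SOURCE B (Python) =====
-- def findIntegers1(num: int) -> int:
--     # Fibonacci bit-scan: f[k] = number of consecutive-one-free k-bit strings.
--     bits = [int(c) for c in bin(num)[2:]]
--     n = len(bits)
--     f = [1, 2]
--     for _ in range(max(0, n - 1)):
--         f.append(f[-1] + f[-2])
--     ans = 0
--     prev = False
--     for i, b in enumerate(bits):
--         if b == 1:
--             ans += f[n - 1 - i]
--             if prev:
--                 return ans
--             prev = True
--         else:
--             prev = False
--     return ans + 1
-- ===== Notes on version B (the rewrite author's own statement) =====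
-- stated objective: simpler
-- what changed: Replaced the memoized four-state digit DP over all bit strings by a single MSB-to-LSB scan that adds a precomputed Fibonacci count at each set bit and stops at the first pair of consecutive ones.
import Mathlib
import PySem

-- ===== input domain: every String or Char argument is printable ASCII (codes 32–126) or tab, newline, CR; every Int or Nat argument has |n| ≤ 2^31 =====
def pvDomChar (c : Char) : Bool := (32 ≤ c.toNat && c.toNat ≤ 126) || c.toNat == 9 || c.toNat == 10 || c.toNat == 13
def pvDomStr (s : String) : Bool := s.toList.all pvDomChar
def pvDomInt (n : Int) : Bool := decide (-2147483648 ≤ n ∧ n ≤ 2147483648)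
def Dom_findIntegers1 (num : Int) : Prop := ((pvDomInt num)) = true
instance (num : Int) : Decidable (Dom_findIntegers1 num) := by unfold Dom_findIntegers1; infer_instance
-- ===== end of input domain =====

-- B replaces A's memoized digit DP by a Fibonacci-table bit scan (objective: simpler).

-- ===== PORT A =====
-- bin(num)[2:] as a list of 0/1 Ints, most significant first (bin(0)[2:] = "0").
def pvBitsAux : Nat → List Int
  | 0 => []
  | n+1 => pvBitsAux ((n+1)/2) ++ [(((n+1) % 2 : Nat) : Int)]
  decreasing_by exact Nat.div_lt_self (Nat.succ_pos n) (by omega)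

def pvBits (n : Nat) : List Int := if n = 0 then [0] else pvBitsAux n

-- dp(idx, prefix, bigger, last_one): recursion on the suffix N[idx:] of the bit list.
-- lru_cache is pure memoization; ported as plain recursion.
def pvDpA : List Int → Bool → Bool → Bool → Int
  | [], _, bigger, _ => if bigger then 0 else 1
  | b :: rest, pfx, bigger, lastOne =>
    ([0] ++ (if lastOne then [] else [1])).foldl
      (fun res bit =>
        res + pvDpA rest (pfx && (bit == b)) (bigger || (pfx && (bit == 1) && (b == 0))) (bit == 1))
      0

def findIntegers1 (num : Int) : Int := pvDpA (pvBits num.toNat) true false false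

-- ===== PORT B =====
-- f.append(f[-1] + f[-2]) repeated k times; f[-1]/f[-2] ported via getD on the in-range indices.
def pvFibAppend : List Int → Nat → List Int
  | f, 0 => f
  | f, k+1 => pvFibAppend (f ++ [f.getD (f.length - 1) 0 + f.getD (f.length - 2) 0]) k

-- the for-loop over enumerate(bits): i is the index, prev/ans the loop state; early return on prev.
def pvScanB (f : List Int) (n : Nat) : List Int → Nat → Bool → Int → Int
  | [], _, _, ans => ans + 1
  | b :: rest, i, prev, ans =>
    if b == 1 then
      let ans' := ans + f.getD (n - 1 - i) 0
      if prev then ans' else pvScanB f n rest (i+1) true ans'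
    else pvScanB f n rest (i+1) false ans

def findIntegers1_alt (num : Int) : Int :=
  let bits := pvBits num.toNat
  let n := bits.length
  let f := pvFibAppend [1, 2] (n - 1)
  pvScanB f n bits 0 false 0

-- ===== PRECONDITION & SPEC =====
-- A raises ValueError on negative num (bin(num)[2:] starts with 'b'); excluded.
def Pre_findIntegers1 (num : Int) : Prop := 0 ≤ num
instance (num : Int) : Decidable (Pre_findIntegers1 num) := by unfold Pre_findIntegers1; infer_instance
def pvWitness_findIntegers1 : Int := (5)

def Spec_findIntegers1 (num : Int) (out : Int) : Prop := out = findIntegers1_alt num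
instance (num : Int) (out : Int) : Decidable (Spec_findIntegers1 num out) := by unfold Spec_findIntegers1; infer_instance

-- ===== CLAIM (what is proved, stated in full; the proofs are below) =====
def Claim_equal_findIntegers1 : Prop := ∀ (num : Int), Dom_findIntegers1 num → Pre_findIntegers1 num → Spec_findIntegers1 num (findIntegers1 num)

-- ===== LEMMAS AND PROOFS =====

-- the pure counting function: g l m = number of consecutive-one-free bit strings of length m
-- whose first bit must be 0 when l = true
def pvG (l : Bool) : Nat → Int
  | 0 => 1
  | m+1 => if l then pvG false m else pvG false m + pvG true m

-- abstract form of B's scan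
def pvScanRel : List Int → Bool → Int
  | [], _ => 1
  | b :: rest, l =>
    if b == 1 then (if l then pvG false rest.length else pvG false rest.length + pvScanRel rest true)
    else pvScanRel rest false

theorem pvDpA_bigger (bs : List Int) (p l : Bool) : pvDpA bs p true l = 0 := by
  induction bs generalizing p l with
  | nil => rfl
  | cons b rest ih =>
    cases l <;> simp [pvDpA, List.foldl, ih]

theorem pvDpA_free (bs : List Int) (l : Bool) : pvDpA bs false false l = pvG l bs.length := by
  induction bs generalizing l with
  | nil => cases l <;> rfl
  | cons b rest ih =>
    cases l <;> simp [pvDpA, List.foldl, pvG, ih]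

theorem pvDpA_main (bs : List Int) (h : ∀ b ∈ bs, b = 0 ∨ b = 1) (l : Bool) :
    pvDpA bs true false l = pvScanRel bs l := by
  induction bs generalizing l with
  | nil => cases l <;> rfl
  | cons b rest ih =>
    have hb : b = 0 ∨ b = 1 := h b (List.mem_cons_self ..)
    have hr : ∀ x ∈ rest, x = 0 ∨ x = 1 := fun x hx => h x (List.mem_cons_of_mem _ hx)
    rcases hb with rfl | rfl <;> cases l <;>
      simp [pvDpA, List.foldl, pvScanRel, pvDpA_bigger, pvDpA_free, ih hr]

theorem pvBitsAux_01 (n : Nat) : ∀ b ∈ pvBitsAux n, b = 0 ∨ b = 1 := by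
  induction n using Nat.strong_induction_on with
  | _ n ih =>
    match n with
    | 0 => simp [pvBitsAux]
    | m+1 =>
      intro b hb
      rw [pvBitsAux] at hb
      rcases List.mem_append.mp hb with h1 | h2
      · exact ih ((m+1)/2) (Nat.div_lt_self (Nat.succ_pos m) (by omega)) b h1
      · simp at h2
        omega

theorem pvBits_01 (n : Nat) : ∀ b ∈ pvBits n, b = 0 ∨ b = 1 := by
  unfold pvBits
  split
  · simp
  · exact pvBitsAux_01 n

theorem pvG_step (m : Nat) : pvG false (m+2) = pvG false (m+1) + pvG false m := by
  simp [pvG]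

theorem pvFibAppend_spec (k m : Nat) :
    pvFibAppend ((List.range (m+2)).map (pvG false)) k = (List.range (m+2+k)).map (pvG false) := by
  induction k generalizing m with
  | zero => rfl
  | succ k ih =>
    rw [pvFibAppend]
    have hlen : ((List.range (m+2)).map (pvG false)).length = m + 2 := by simp
    have h1 : ((List.range (m+2)).map (pvG false)).getD (m+1) 0 = pvG false (m+1) := by
      simp [List.getD_eq_getElem?_getD]
    have h2 : ((List.range (m+2)).map (pvG false)).getD m 0 = pvG false m := by
      simp [List.getD_eq_getElem?_getD]
    have happ : (List.range (m+2)).map (pvG false) ++ [pvG false (m+1) + pvG false m]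
        = (List.range (m+3)).map (pvG false) := by
      conv_rhs => rw [show (m+3 : Nat) = (m+2)+1 from rfl, List.range_succ, List.map_append]
      rw [← pvG_step]
      simp
    rw [hlen]
    rw [show m + 2 - 1 = m + 1 from rfl, show m + 2 - 2 = m from rfl, h1, h2, happ]
    rw [show m + 3 = m + 1 + 2 from rfl, ih (m+1)]
    congr 2
    omega

theorem pvScanB_acc (n : Nat) (f : List Int)
    (hf : ∀ k < n, f.getD k 0 = pvG false k) :
    ∀ (bs : List Int) (i : Nat), i + bs.length = n →
      ∀ (prev : Bool) (ans : Int), pvScanB f n bs i prev ans = ans + pvScanRel bs prev := by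
  intro bs
  induction bs with
  | nil => intro i _ prev ans; simp [pvScanB, pvScanRel]
  | cons b rest ih =>
    intro i hi prev ans
    have hidx : n - 1 - i = rest.length := by simp at hi; omega
    have hlt : rest.length < n := by simp at hi; omega
    by_cases hb : b = 1
    · subst hb
      have hfr := hf _ hlt
      rw [List.getD_eq_getElem?_getD] at hfr
      cases prev <;>
        simp [pvScanB, hidx, pvScanRel, ih (i+1) (by simp at hi ⊢; omega), hfr] <;> ring
    · have hbe : (b == 1) = false := by simp [hb]
      simp [pvScanB, hbe, pvScanRel, ih (i+1) (by simp at hi ⊢; omega)]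

theorem pvBits_ne_nil (n : Nat) : pvBits n ≠ [] := by
  unfold pvBits
  split
  · simp
  · rename_i h
    match n, h with
    | m+1, _ =>
      rw [pvBitsAux]
      simp

-- ===== VERDICT (by name: the statement is the Claim_ definition above) =====
theorem findIntegers1_spec : Claim_equal_findIntegers1 := by
  intro num _ _
  unfold Spec_findIntegers1 findIntegers1 findIntegers1_alt
  set bs := pvBits num.toNat with hbs
  have hne : bs ≠ [] := hbs ▸ pvBits_ne_nil _
  have h01 : ∀ b ∈ bs, b = 0 ∨ b = 1 := hbs ▸ pvBits_01 _
  clear_value bs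
  have hlen : 1 ≤ bs.length := by
    cases bs with
    | nil => exact (hne rfl).elim
    | cons a t => simp
  have hfib : pvFibAppend [1, 2] (bs.length - 1) = (List.range (bs.length + 1)).map (pvG false) := by
    have h0 : ([1, 2] : List Int) = (List.range 2).map (pvG false) := by
      simp [List.range_succ, pvG]
    rw [h0, pvFibAppend_spec]
    congr 2
    omega
  have hf : ∀ k < bs.length, (pvFibAppend [1, 2] (bs.length - 1)).getD k 0 = pvG false k := by
    intro k hk
    rw [hfib]
    have hk1 : k < bs.length + 1 := by omega
    simp [List.getD_eq_getElem?_getD, hk1]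
  rw [pvScanB_acc bs.length _ hf bs 0 (by simp) false 0]
  rw [pvDpA_main bs h01 false]
  ring
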